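-- pv_equiv track=rewrite | github.com/engrenage13/Anovel | reve/decodeuses.py | checkFinCadre
-- ===== SOURCE A (Python) =====
-- def checkFinCadre(ligne: str) -> bool:
--     rep = False
--     if "]" in ligne:
--         position = ligne.index("]")
--         if position == len(ligne)-1:
--             rep = True
--         else:
--             rep = True
--             i = position+1
--             while i < len(ligne) and rep:
--                 car = ligne[i]
--                 if car != " ":
--                     rep = False
--                 i = i + 1
--     return rep
-- ===== SOURCE B (Python) =====
-- def checkFinCadre(ligne: str) -> bool:
--     return ligne.count(']') == 1 and ligne.rstrip(' ').endswith(']')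
-- ===== Notes on version B (the rewrite author's own statement) =====
-- stated objective: simpler
-- what changed: Replaces the find-index-then-while character scan with a one-line predicate: exactly one ']' in the string and, after stripping trailing spaces only, the string ends with ']'.
import Mathlib
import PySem

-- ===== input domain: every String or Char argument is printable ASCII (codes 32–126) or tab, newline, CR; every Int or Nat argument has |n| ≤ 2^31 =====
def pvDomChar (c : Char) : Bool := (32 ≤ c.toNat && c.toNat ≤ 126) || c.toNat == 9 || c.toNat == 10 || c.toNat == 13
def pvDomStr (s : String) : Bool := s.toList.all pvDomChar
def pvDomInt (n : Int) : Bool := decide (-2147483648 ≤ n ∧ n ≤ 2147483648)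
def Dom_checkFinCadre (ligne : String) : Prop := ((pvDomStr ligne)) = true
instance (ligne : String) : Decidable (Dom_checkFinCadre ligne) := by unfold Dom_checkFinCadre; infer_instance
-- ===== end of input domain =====

-- B replaces A's find-index-then-while scan with a one-line predicate (count == 1 and rstrip(' ').endswith(']')); objective: simpler.

-- ===== PORT A =====
-- the while loop 'while i < len(ligne) and rep: …' over the suffix after the first ']',
-- transcribed as structural recursion on that suffix with the same state 'rep'
def whileA : List Char → Bool → Bool
  | [], rep => rep
  | c :: rest, rep =>
      if rep then whileA rest (if c ≠ ' ' then false else rep) else rep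

def checkFinCadre (ligne : String) : Bool :=
  if ']' ∈ ligne.toList then                     -- '"]" in ligne' (exact for a one-char needle)
    let position := List.idxOf ']' ligne.toList  -- ligne.index("]") (present, so no ValueError)
    if position = ligne.toList.length - 1 then true
    else whileA (ligne.toList.drop (position + 1)) true
  else false

-- ===== PORT B =====
-- ligne.rstrip(' '): drop trailing ' ' characters only (hand-written, exact)
def rstripSp : List Char → List Char
  | [] => []
  | c :: cs =>
      match rstripSp cs with
      | [] => if c == ' ' then [] else [c]
      | r => c :: r

def checkFinCadre_alt (ligne : String) : Bool :=
  (ligne.toList.count ']' == 1) && ((rstripSp ligne.toList).getLast? == some ']')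
  -- .endswith(']') ported as: last character is ']'

-- ===== PRECONDITION & SPEC =====
def Spec_checkFinCadre (ligne : String) (out : Bool) : Prop := out = checkFinCadre_alt ligne
instance (ligne : String) (out : Bool) : Decidable (Spec_checkFinCadre ligne out) := by unfold Spec_checkFinCadre; infer_instance

-- ===== CLAIM (what is proved, stated in full; the proofs are below) =====
def Claim_equal_checkFinCadre : Prop := ∀ (ligne : String), Dom_checkFinCadre ligne → Spec_checkFinCadre ligne (checkFinCadre ligne)

-- ===== LEMMAS AND PROOFS =====

-- common reference predicate: true iff the first ']' exists and is followed only by spaces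
def specRB : List Char → Bool
  | [] => false
  | c :: cs => if c = ']' then cs.all (· == ' ') else specRB cs

theorem whileA_false (l : List Char) : whileA l false = false := by
  cases l <;> simp [whileA]

theorem whileA_true (l : List Char) : whileA l true = l.all (· == ' ') := by
  induction l with
  | nil => rfl
  | cons c cs ih =>
      simp only [whileA, List.all_cons, if_pos trivial]
      by_cases h : c = ' '
      · simp [h, ih]
      · simp [h, whileA_false]

theorem specRB_of_not_mem (cs : List Char) (h : ']' ∉ cs) : specRB cs = false := by
  induction cs with
  | nil => rfl
  | cons c cs ih =>
      have hc : ¬ c = ']' := fun e => h (by simp [e])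
      simp only [specRB, if_neg hc]
      exact ih (fun hm => h (List.mem_cons_of_mem _ hm))

theorem a_key (l : List Char) :
    (if ']' ∈ l then
       if List.idxOf ']' l = l.length - 1 then true
       else whileA (l.drop (List.idxOf ']' l + 1)) true
     else false) = specRB l := by
  induction l with
  | nil => rfl
  | cons c cs ih =>
      by_cases hc : c = ']'
      · subst hc
        rw [if_pos (List.mem_cons_self ..), List.idxOf_cons_self]
        cases cs with
        | nil => simp [specRB]
        | cons d ds =>
            rw [if_neg (by simp)]
            simp [specRB, whileA_true]
      · have hmem : (']' ∈ c :: cs) ↔ (']' ∈ cs) := by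
          simp [List.mem_cons, eq_comm, hc]
        have hidx : List.idxOf ']' (c :: cs) = List.idxOf ']' cs + 1 := by
          simp [hc]
        simp only [specRB, if_neg hc]
        by_cases hm : ']' ∈ cs
        · rw [if_pos (hmem.mpr hm), hidx, if_pos hm] at *
          have he : (List.idxOf ']' cs + 1 = (c :: cs).length - 1) ↔
              (List.idxOf ']' cs = cs.length - 1) := by
            have := List.idxOf_lt_length_of_mem hm
            simp only [List.length_cons]; omega
          have hdrop : List.drop (List.idxOf ']' cs + 1 + 1) (c :: cs)
              = List.drop (List.idxOf ']' cs + 1) cs := rfl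
          rw [hdrop, ← ih]
          by_cases he2 : List.idxOf ']' cs = cs.length - 1
          · rw [if_pos (he.mpr he2), if_pos he2]
          · rw [if_neg (fun h => he2 (he.mp h)), if_neg he2]
        · rw [if_neg (fun h => hm (hmem.mp h))]
          exact (specRB_of_not_mem cs hm).symm

theorem mem_rstripSp {x : Char} (cs : List Char) (h : x ∈ rstripSp cs) : x ∈ cs := by
  induction cs with
  | nil => simp [rstripSp] at h
  | cons c cs ih =>
      simp only [rstripSp] at h
      cases hr : rstripSp cs with
      | nil =>
          rw [hr] at h
          by_cases hc : c == ' '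
          · simp [hc] at h
          · simp [hc] at h; simp [h]
      | cons d ds =>
          rw [hr] at h
          rcases (List.mem_cons.mp h) with h1 | h2
          · simp [h1]
          · exact List.mem_cons_of_mem _ (ih (hr ▸ h2))

theorem rstripSp_eq_nil_iff (cs : List Char) : rstripSp cs = [] ↔ cs.all (· == ' ') := by
  induction cs with
  | nil => simp [rstripSp]
  | cons c cs ih =>
      simp only [rstripSp, List.all_cons]
      cases hr : rstripSp cs with
      | nil =>
          have hall : cs.all (· == ' ') = true := ih.mp hr
          by_cases hc : c == ' ' <;> simp [hc, hall]
      | cons d ds =>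
          have : ¬ cs.all (· == ' ') = true := by
            intro h; rw [← ih] at h; simp [h] at hr
          simp [this]

theorem b_key (l : List Char) :
    ((l.count ']' == 1) && ((rstripSp l).getLast? == some ']')) = specRB l := by
  induction l with
  | nil => rfl
  | cons c cs ih =>
      by_cases hc : c = ']'
      · subst hc
        simp only [specRB, List.count_cons_self]
        rw [if_pos trivial]
        by_cases hm : ']' ∈ cs
        · -- a second ']' exists: count ≥ 2, and 'cs all spaces' fails too
          have h1 : (cs.count ']' + 1 == 1) = false := by
            have := List.one_le_count_iff.mpr hm
            simp only [beq_eq_false_iff_ne, ne_eq]; omega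
          have h2 : cs.all (· == ' ') = false := by
            apply Bool.eq_false_iff.mpr; intro hall
            have := List.all_eq_true.mp hall ']' hm
            simp at this
          rw [h1, h2, Bool.false_and]
        · have h1 : (cs.count ']' + 1 == 1) = true := by
            have : cs.count ']' = 0 := List.count_eq_zero.mpr hm
            simp [this]
          rw [h1, Bool.true_and]
          by_cases hall : cs.all (· == ' ') = true
          · have : rstripSp cs = [] := (rstripSp_eq_nil_iff cs).mpr hall
            simp [rstripSp, this, hall]
          · have hne : rstripSp cs ≠ [] := fun h => hall ((rstripSp_eq_nil_iff cs).mp h)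
            cases hr : rstripSp cs with
            | nil => exact absurd hr hne
            | cons d ds =>
                have hstep : rstripSp (']' :: cs) = ']' :: d :: ds := by
                  simp only [rstripSp, hr]
                rw [hstep, List.getLast?_cons_cons]
                have hlast : (d :: ds).getLast? ≠ some ']' := by
                  intro h
                  exact hm (mem_rstripSp cs (hr ▸ List.mem_of_getLast? h))
                simp [Bool.eq_false_iff, hlast, Bool.eq_false_iff.mpr hall]
      · simp only [specRB, if_neg hc]
        have hcnt : (c :: cs).count ']' = cs.count ']' := by
          simp [hc]
        rw [hcnt]
        cases hr : rstripSp cs with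
        | nil =>
            -- cs is all spaces: no ']' in cs, so count is 0 and specRB cs is false
            have hall : cs.all (· == ' ') = true := (rstripSp_eq_nil_iff cs).mp hr
            have hm : ']' ∉ cs := by
              intro h
              have := List.all_eq_true.mp hall ']' h
              simp at this
            have hcnt0 : cs.count ']' = 0 := List.count_eq_zero.mpr hm
            have hspec : specRB cs = false := specRB_of_not_mem cs hm
            have hstep : rstripSp (c :: cs) = if c == ' ' then [] else [c] := by
              simp only [rstripSp, hr]
            rw [hstep, hspec, hcnt0]
            by_cases hcsp : c == ' ' <;> simp [hcsp]
        | cons d ds =>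
            have hstep : rstripSp (c :: cs) = c :: d :: ds := by
              simp only [rstripSp, hr]
            rw [hstep, List.getLast?_cons_cons, ← hr, ← ih]

-- ===== VERDICT (by name: the statement is the Claim_ definition above) =====
theorem checkFinCadre_spec : Claim_equal_checkFinCadre := by
  intro ligne _
  unfold Spec_checkFinCadre
  have ha : checkFinCadre ligne = specRB ligne.toList := a_key ligne.toList
  have hb : checkFinCadre_alt ligne = specRB ligne.toList := b_key ligne.toList
  rw [ha, hb]
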